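-- pv_equiv track=rewrite | github.com/Ace1928/eidosian_forge | scripts/code_forge_archive_plan.py | _count_state_by_status
-- ===== SOURCE A (Python) =====
-- from collections import Counter
-- from typing import Any, Iterable
--
-- def _count_state_by_status(state: dict[str, Any]) -> dict[str, int]:
--     counter: Counter[str] = Counter()
--     batches = state.get("batches") if isinstance(state, dict) else {}
--     if isinstance(batches, dict):
--         for item in batches.values():
--             if isinstance(item, dict):
--                 counter[str(item.get("status") or "pending")] += 1
--     return dict(sorted(counter.items()))
-- ===== SOURCE B (Python) =====
-- from itertools import groupby
--
--
-- def _count_state_by_status(state):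
--     batches = state.get("batches") if isinstance(state, dict) else {}
--     statuses = []
--     if isinstance(batches, dict):
--         for item in batches.values():
--             if isinstance(item, dict):
--                 statuses.append(str(item.get("status") or "pending"))
--     statuses.sort()
--     return {s: len(list(g)) for s, g in groupby(statuses)}
-- ===== Notes on version B (the rewrite author's own statement) =====
-- stated objective: alternative
-- what changed: B replaces the Counter hash-counting with sort-then-group: it collects the status strings into a flat list, sorts it, and emits counts of consecutive equal runs via itertools.groupby, producing the sorted result directly.
import Mathlib
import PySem

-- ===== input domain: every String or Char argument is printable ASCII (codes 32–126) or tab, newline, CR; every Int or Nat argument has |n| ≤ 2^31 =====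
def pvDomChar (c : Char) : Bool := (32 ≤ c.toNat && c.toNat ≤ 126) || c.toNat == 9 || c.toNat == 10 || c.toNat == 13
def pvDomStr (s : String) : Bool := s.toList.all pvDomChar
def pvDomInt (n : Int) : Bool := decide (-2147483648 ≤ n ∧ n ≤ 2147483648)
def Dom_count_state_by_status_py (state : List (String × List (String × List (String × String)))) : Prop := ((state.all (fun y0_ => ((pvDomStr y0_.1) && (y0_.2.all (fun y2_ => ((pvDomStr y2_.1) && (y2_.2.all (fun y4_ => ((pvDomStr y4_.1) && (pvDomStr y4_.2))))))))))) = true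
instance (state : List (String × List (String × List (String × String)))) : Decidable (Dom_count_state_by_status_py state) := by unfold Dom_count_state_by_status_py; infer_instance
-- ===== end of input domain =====

-- B sorts the flat list of status strings and counts consecutive runs (a groupby) instead of hash-counting with a Counter; objective: alternative.

-- ===== PORT A =====
-- str(item.get("status") or "pending"): a missing key (None) or an empty string is falsy → "pending"; str() is the identity on str values
def pvStatus (item : List (String × String)) : String :=
  match (PySem.Dict.mk item).get? "status" with
  | none => "pending"
  | some s => if s = "" then "pending" else s

def count_state_by_status_py (state : List (String × List (String × List (String × String)))) : List (String × Int) :=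
  match (PySem.Dict.mk state).get? "batches" with
  | none => []  -- state.get("batches") is None: `isinstance(batches, dict)` is false, the Counter stays empty
  | some batches =>
      -- the Counter loop, then sorted(counter.items()): the Counter's keys are distinct,
      -- so Python's lexicographic sort of the (key, count) tuples is exactly the sort by
      -- key (exact here); dict(...) of distinct-key pairs is that association list itself
      PySem.List.sorted
        ((PySem.Dict.mk batches).values.foldl
          (fun c item => c.modify (pvStatus item) 0 (· + 1)) PySem.Dict.empty).items
        (fun p => p.1)

-- ===== PORT B =====
-- hand port of the groupby comprehension {s: len(list(g)) for s, g in groupby(statuses)}: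
-- each step emits the head with the length of its initial run and recurses on the rest (exact)
def pvGroupCounts : List String → List (String × Int)
  | [] => []
  | x :: xs =>
      (x, ((xs.takeWhile (fun y => x == y)).length : Int) + 1) ::
        pvGroupCounts (xs.dropWhile (fun y => x == y))
termination_by l => l.length
decreasing_by
  simp only [List.length_cons]
  exact Nat.lt_succ_of_le (List.length_dropWhile_le _ _)

def count_state_by_status_py_alt (state : List (String × List (String × List (String × String)))) : List (String × Int) :=
  pvGroupCounts (PySem.List.sorted
    (match (PySem.Dict.mk state).get? "batches" with
     | none => ([] : List String)
     | some batches => (PySem.Dict.mk batches).values.map pvStatus)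
    (fun s => s))

-- ===== PRECONDITION & SPEC =====
def Spec_count_state_by_status_py (state : List (String × List (String × List (String × String)))) (out : List (String × Int)) : Prop := out = count_state_by_status_py_alt state
instance (state : List (String × List (String × List (String × String)))) (out : List (String × Int)) : Decidable (Spec_count_state_by_status_py state out) := by unfold Spec_count_state_by_status_py; infer_instance

-- ===== CLAIM (what is proved, stated in full; the proofs are below) =====
def Claim_equal_count_state_by_status_py : Prop := ∀ (state : List (String × List (String × List (String × String)))), Dom_count_state_by_status_py state → Spec_count_state_by_status_py state (count_state_by_status_py state)

-- ===== LEMMAS AND PROOFS =====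

-- the head of dropWhile fails the predicate
theorem pv_head?_dropWhile {α : Type} (p : α → Bool) :
    ∀ (xs : List α) (a : α), (xs.dropWhile p).head? = some a → p a = false := by
  intro xs
  induction xs with
  | nil => intro a h; simp at h
  | cons y ys ih =>
      intro a h
      by_cases hy : p y = true
      · rw [List.dropWhile_cons_of_pos hy] at h; exact ih a h
      · rw [List.dropWhile_cons_of_neg hy] at h
        simp at h; subst h; simpa using hy

-- in a ≤-sorted list x :: xs, everything surviving the initial run of x's is strictly greater than x
theorem pv_lt_of_mem_drop (x : String) (xs : List String)
    (hp : (x :: xs).Pairwise (· ≤ ·)) :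
    ∀ z ∈ xs.dropWhile (fun y => x == y), x < z := by
  have hxle : ∀ y ∈ xs, x ≤ y := (List.pairwise_cons.mp hp).1
  have hpxs : xs.Pairwise (· ≤ ·) := (List.pairwise_cons.mp hp).2
  have hpr : (xs.dropWhile (fun y => x == y)).Pairwise (· ≤ ·) :=
    hpxs.sublist (List.dropWhile_sublist _)
  intro z hz
  cases hr : xs.dropWhile (fun y => x == y) with
  | nil => rw [hr] at hz; simp at hz
  | cons h t =>
      have hhead : (fun y => x == y) h = false := by
        apply pv_head?_dropWhile (fun y => x == y) xs
        rw [hr]; rfl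
      have hxh : x ≠ h := by simpa using hhead
      have hxleh : x ≤ h := hxle h ((List.dropWhile_sublist _).subset (by rw [hr]; exact List.mem_cons_self))
      have hxlth : x < h := lt_of_le_of_ne hxleh hxh
      rw [hr] at hz hpr
      rcases List.mem_cons.mp hz with rfl | hz'
      · exact hxlth
      · exact lt_of_lt_of_le hxlth ((List.pairwise_cons.mp hpr).1 z hz')

theorem pv_take_all_eq (x : String) (xs : List String) :
    ∀ y ∈ xs.takeWhile (fun y => x == y), y = x := by
  intro y hy
  have h := List.mem_takeWhile_imp hy
  exact (eq_of_beq h).symm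

-- count of x in x :: xs is one plus the initial run of x's, for ≤-sorted input
theorem pv_count_head (x : String) (xs : List String)
    (hp : (x :: xs).Pairwise (· ≤ ·)) :
    List.count x (x :: xs) = (xs.takeWhile (fun y => x == y)).length + 1 := by
  have hsplit : xs.takeWhile (fun y => x == y) ++ xs.dropWhile (fun y => x == y) = xs :=
    List.takeWhile_append_dropWhile
  have hct : List.count x (xs.takeWhile (fun y => x == y)) = (xs.takeWhile (fun y => x == y)).length :=
    List.count_eq_length.mpr (fun y hy => by rw [pv_take_all_eq x xs y hy])
  have hcr : List.count x (xs.dropWhile (fun y => x == y)) = 0 :=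
    List.count_eq_zero.mpr (fun hmem => lt_irrefl x (pv_lt_of_mem_drop x xs hp x hmem))
  calc List.count x (x :: xs) = List.count x xs + 1 := by rw [List.count_cons_self]
    _ = List.count x (xs.takeWhile (fun y => x == y) ++ xs.dropWhile (fun y => x == y)) + 1 := by
          rw [hsplit]
    _ = (xs.takeWhile (fun y => x == y)).length + 1 := by
          rw [List.count_append, hct, hcr]

-- count of k ≠ x in x :: xs equals its count past the initial run of x's
theorem pv_count_ne (x k : String) (xs : List String) (hk : k ≠ x) :
    List.count k (x :: xs) = List.count k (xs.dropWhile (fun y => x == y)) := by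
  have hsplit : xs.takeWhile (fun y => x == y) ++ xs.dropWhile (fun y => x == y) = xs :=
    List.takeWhile_append_dropWhile
  have hct : List.count k (xs.takeWhile (fun y => x == y)) = 0 :=
    List.count_eq_zero.mpr (fun hmem => hk (pv_take_all_eq x xs k hmem))
  have hxk : (x == k) = false := beq_eq_false_iff_ne.mpr (Ne.symm hk)
  calc List.count k (x :: xs) = List.count k xs := by
          rw [List.count_cons, hxk]; simp
    _ = List.count k (xs.takeWhile (fun y => x == y) ++ xs.dropWhile (fun y => x == y)) := by
          rw [hsplit]
    _ = List.count k (xs.dropWhile (fun y => x == y)) := by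
          rw [List.count_append, hct]; simp

-- membership characterisation of pvGroupCounts on a ≤-sorted list
theorem pvGroup_mem : ∀ (l : List String), l.Pairwise (· ≤ ·) →
    ∀ (k : String) (n : Int), ((k, n) ∈ pvGroupCounts l ↔ k ∈ l ∧ n = (List.count k l : Int)) := by
  intro l
  induction l using pvGroupCounts.induct with
  | case1 => intro _ k n; simp [pvGroupCounts]
  | case2 x xs ih =>
      intro hp k n
      have hpr : (xs.dropWhile (fun y => x == y)).Pairwise (· ≤ ·) :=
        ((List.pairwise_cons.mp hp).2).sublist (List.dropWhile_sublist _)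
      rw [pvGroupCounts]
      constructor
      · intro hmem
        rcases List.mem_cons.mp hmem with heq | hmem'
        · rw [Prod.mk.injEq] at heq
          obtain ⟨rfl, rfl⟩ := heq
          refine ⟨List.mem_cons_self, ?_⟩
          rw [pv_count_head _ xs hp]
          push_cast; ring
        · obtain ⟨h1, h2⟩ := (ih hpr k n).mp hmem'
          have hne : k ≠ x := fun heq => by
            have := pv_lt_of_mem_drop x xs hp k h1
            rw [heq] at this; exact lt_irrefl x this
          refine ⟨List.mem_cons_of_mem _ ((List.dropWhile_sublist _).subset h1), ?_⟩
          rw [h2, pv_count_ne x k xs hne]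
      · rintro ⟨h1, h2⟩
        by_cases hkx : k = x
        · subst hkx
          apply List.mem_cons.mpr
          left
          have : n = ((xs.takeWhile (fun y => k == y)).length : Int) + 1 := by
            rw [h2, pv_count_head k xs hp]; push_cast; ring
          rw [this]
        · apply List.mem_cons_of_mem
          apply (ih hpr k n).mpr
          have h1' : k ∈ xs.dropWhile (fun y => x == y) := by
            rcases List.mem_cons.mp h1 with h | h
            · exact absurd h hkx
            · rw [← List.takeWhile_append_dropWhile (p := fun y => x == y) (l := xs)] at h
              rcases List.mem_append.mp h with h' | h'
              · exact absurd (pv_take_all_eq x xs k h') hkx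
              · exact h'
          exact ⟨h1', by rw [h2, pv_count_ne x k xs hkx]⟩

-- the keys of pvGroupCounts are strictly increasing on a ≤-sorted list
theorem pvGroup_pairwise : ∀ (l : List String), l.Pairwise (· ≤ ·) →
    (pvGroupCounts l).Pairwise (fun a b => a.1 < b.1) := by
  intro l
  induction l using pvGroupCounts.induct with
  | case1 => intro _; simp [pvGroupCounts]
  | case2 x xs ih =>
      intro hp
      have hpr : (xs.dropWhile (fun y => x == y)).Pairwise (· ≤ ·) :=
        ((List.pairwise_cons.mp hp).2).sublist (List.dropWhile_sublist _)
      rw [pvGroupCounts]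
      apply List.pairwise_cons.mpr
      refine ⟨?_, ih hpr⟩
      rintro ⟨k, n⟩ hpmem
      have h1 : k ∈ xs.dropWhile (fun y => x == y) :=
        ((pvGroup_mem _ hpr k n).mp hpmem).1
      exact pv_lt_of_mem_drop x xs hp k h1

-- the central identity: sorting Counter(xs).items() by key equals grouping the sorted list
theorem pv_sorted_counter_eq_group (xs : List String) :
    PySem.List.sorted (PySem.Dict.counter xs).items (fun p => p.1) =
      pvGroupCounts (PySem.List.sorted xs (fun s => s)) := by
  have hperm : (PySem.List.sorted xs (fun s => s)).Perm xs := PySem.List.sorted_perm xs _ _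
  have hpl : (PySem.List.sorted xs (fun s => s)).Pairwise (· ≤ ·) := by
    simpa using PySem.List.sorted_pairwise xs (fun s => s)
  apply PySem.List.sorted_eq_of_perm_of_pairwise_lt
  · rw [PySem.Dict.items_counter]
    have hnd1 : (pvGroupCounts (PySem.List.sorted xs (fun s => s))).Nodup := by
      have h := pvGroup_pairwise _ hpl
      exact h.imp (fun hlt => fun he => absurd (he ▸ hlt) (lt_irrefl _))
    have hnd2 : (List.map (fun k => (k, (List.count k xs : Int))) (PySem.Set.ofList xs)).Nodup := by
      apply List.Nodup.map
      · intro a b hab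
        simpa using congrArg Prod.fst hab
      · exact PySem.Set.nodup_ofList xs
    apply (List.perm_ext_iff_of_nodup hnd1 hnd2).mpr
    rintro ⟨k, n⟩
    rw [pvGroup_mem _ hpl k n]
    constructor
    · rintro ⟨h1, h2⟩
      apply List.mem_map.mpr
      refine ⟨k, (PySem.Set.mem_ofList xs k).mpr (hperm.subset h1), ?_⟩
      rw [h2, hperm.count_eq k]
    · intro hmem
      obtain ⟨k', hk', hkp⟩ := List.mem_map.mp hmem
      obtain ⟨rfl, rfl⟩ : k' = k ∧ ((List.count k' xs : Int)) = n := by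
        simpa [Prod.ext_iff] using hkp
      have hk'' : k' ∈ xs := (PySem.Set.mem_ofList xs k').mp hk'
      exact ⟨hperm.mem_iff.mpr hk'', by rw [hperm.count_eq k']⟩
  · exact pvGroup_pairwise _ hpl

-- ===== VERDICT (by name: the statement is the Claim_ definition above) =====
theorem count_state_by_status_py_spec : Claim_equal_count_state_by_status_py := by
  intro state _
  unfold Spec_count_state_by_status_py count_state_by_status_py count_state_by_status_py_alt
  cases h : (PySem.Dict.mk state).get? "batches" with
  | none => simp [pvGroupCounts, PySem.List.sorted]
  | some batches =>
      show PySem.List.sorted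
          ((List.foldl (fun c item => c.modify (pvStatus item) 0 (· + 1)) PySem.Dict.empty
            (PySem.Dict.mk batches).values).items)
          (fun p => p.1) =
        pvGroupCounts (PySem.List.sorted (List.map pvStatus (PySem.Dict.mk batches).values) (fun s => s))
      have hfold : ((PySem.Dict.mk batches).values.foldl
            (fun c item => c.modify (pvStatus item) 0 (· + 1)) PySem.Dict.empty)
          = PySem.Dict.counter ((PySem.Dict.mk batches).values.map pvStatus) := by
        rw [PySem.Dict.counter_eq_foldl, List.foldl_map]
      rw [hfold]
      exact pv_sorted_counter_eq_group _
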